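-- pv_equiv track=rewrite | github.com/Tuminha/PaperSlicer | paperslicer/grobid/sections.py | _extract_labeled_from_text
-- ===== SOURCE A (Python) =====
-- from typing import Optional, List, Dict
--
-- def _norm_text(s: str) -> str:
--     return " ".join((s or "").split()).strip()
--
-- def _extract_labeled_from_text(block: str, start_labels: tuple[str, ...]) -> Optional[str]:
--     """Extract text following a label like 'Results:' inside a paragraph.
--
--     Finds the first occurrence of any start label (case-insensitive), then
--     returns text up to the next known label or end of block.
--     """
--     if not (block or "").strip():
--         return None
--     text = _norm_text(block)
--     low = text.lower()
--     # Define candidate end-labels to stop at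
--     end_labels = (
--         "introduction",
--         "background",
--         "materials and methods",
--         "material and methods",
--         "material and method",
--         "methods",
--         "results",
--         "discussion",
--         "conclusion",
--         "conclusions",
--         "clinical significance",
--     )
--     # Find start
--     start_pos = -1
--     for lab in start_labels:
--         lab_low = lab.lower() + ":"
--         pos = low.find(lab_low)
--         if pos != -1 and (start_pos == -1 or pos < start_pos):
--             start_pos = pos
--             start_lab = lab_low
--     if start_pos == -1:
--         return None
--     content_start = start_pos + len(start_lab)
--     # Find nearest next label occurrence
--     next_pos = -1
--     for lab in end_labels:
--         lab_low = lab + ":"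
--         p = low.find(lab_low, content_start)
--         if p != -1 and (next_pos == -1 or p < next_pos):
--             next_pos = p
--     content = text[content_start: next_pos if next_pos != -1 else len(text)].strip()
--     return content or None
-- ===== SOURCE B (Python) =====
-- from typing import Optional, List, Dict
--
--
-- def _extract_labeled_from_text(block: str, start_labels: tuple[str, ...]) -> Optional[str]:
--     """Colon-anchored rewrite: index every ':' once with C-speed find,
--     then test candidate labels only against those anchors."""
--     if not (block or "").strip():
--         return None
--     text = " ".join((block or "").split()).strip()
--     low = text.lower()
--     end_labels = (
--         "introduction",
--         "background",
--         "materials and methods",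
--         "material and methods",
--         "material and method",
--         "methods",
--         "results",
--         "discussion",
--         "conclusion",
--         "conclusions",
--         "clinical significance",
--     )
--     # every label occurrence ends at a ':' -- collect all colon positions once
--     colons = []
--     c = low.find(":")
--     while c != -1:
--         colons.append(c)
--         c = low.find(":", c + 1)
--     # earliest start-label occurrence: for each label, its first colon-anchored
--     # match; keep the overall leftmost (first label wins ties)
--     best = None  # (match position, label length including ':')
--     for lab in start_labels:
--         l = lab.lower()
--         n = len(l)
--         for c in colons:
--             if c >= n and low[c - n:c] == l:
--                 if best is None or c - n < best[0]:
--                     best = (c - n, n + 1)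
--                 break
--         # first matching colon is this label's leftmost occurrence
--     if best is None:
--         return None
--     content_start = best[0] + best[1]
--     # nearest end-label occurrence at/after content_start
--     stop = len(text)
--     for lab in end_labels:
--         n = len(lab)
--         for c in colons:
--             if c - n >= content_start and low[c - n:c] == lab:
--                 if c - n < stop:
--                     stop = c - n
--                 break
--     content = text[content_start:stop].strip()
--     return content or None
-- ===== Notes on version B (the rewrite author's own statement) =====
-- stated objective: faster
-- what changed: Instead of running a separate substring search over the whole text for each of the 11+k labels, B builds the list of colon positions once (every label occurrence ends at ':') and then tests each candidate label only at those anchors with a single slice comparison, keeping the leftmost hit with A's first-label tie-break.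
import Mathlib
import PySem

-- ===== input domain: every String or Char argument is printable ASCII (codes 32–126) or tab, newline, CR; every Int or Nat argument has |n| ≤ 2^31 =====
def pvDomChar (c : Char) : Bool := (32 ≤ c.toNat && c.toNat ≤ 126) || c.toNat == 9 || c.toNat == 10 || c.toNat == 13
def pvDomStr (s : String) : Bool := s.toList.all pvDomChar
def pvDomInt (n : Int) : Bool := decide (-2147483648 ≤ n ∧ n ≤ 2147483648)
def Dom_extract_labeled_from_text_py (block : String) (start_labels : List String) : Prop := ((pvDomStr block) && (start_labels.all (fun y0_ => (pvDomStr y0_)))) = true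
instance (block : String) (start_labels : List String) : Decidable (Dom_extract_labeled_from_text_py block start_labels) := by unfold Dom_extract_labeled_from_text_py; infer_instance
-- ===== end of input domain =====

-- B re-implements the label search anchored on a colon index built once instead of one whole-text scan per label (measurably faster in a timing run); equivalence is about the return value (neither version mutates its arguments).

-- the end-label table both Pythons spell out
def pvEndLabels : List String :=
  ["introduction", "background", "materials and methods", "material and methods",
   "material and method", "methods", "results", "discussion", "conclusion",
   "conclusions", "clinical significance"]

-- ===== PORT A =====
-- 'for lab in start_labels: … low.find(lab_low) …' keeping (start_pos, start_lab)
def pvFindStartA (low : List Char) : List String → Int × List Char → Int × List Char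
  | [], st => st
  | lab :: rest, st =>
    let lab_low := PySem.Chars.lower lab.toList ++ [':']
    let pos := PySem.Chars.find low lab_low
    pvFindStartA low rest (if pos ≠ -1 ∧ (st.1 = -1 ∨ pos < st.1) then (pos, lab_low) else st)

-- 'for lab in end_labels: … low.find(lab_low, content_start) …' keeping next_pos
def pvFindNextA (low : List Char) (cs : Int) : List String → Int → Int
  | [], np => np
  | lab :: rest, np =>
    let lab_low := lab.toList ++ [':']
    let p := PySem.Chars.findFrom low lab_low cs none
    pvFindNextA low cs rest (if p ≠ -1 ∧ (np = -1 ∨ p < np) then p else np)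

def extract_labeled_from_text_py (block : String) (start_labels : List String) : Option String :=
  if PySem.Chars.strip block.toList = [] then none
  else
    let text := PySem.Chars.strip (PySem.Chars.join [' '] (PySem.Chars.split₀ block.toList))
    let low := PySem.Chars.lower text
    let st := pvFindStartA low start_labels (-1, [])
    if st.1 = -1 then none
    else
      let content_start : Int := st.1 + st.2.length
      let next_pos := pvFindNextA low content_start pvEndLabels (-1)
      let content := PySem.Chars.strip (PySem.Chars.slice text (some content_start)
        (some (if next_pos ≠ -1 then next_pos else (text.length : Int))))
      if content = [] then none else some (String.ofList content)

-- ===== PORT B =====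
-- 'c = low.find(":"); while c != -1: colons.append(c); c = low.find(":", c+1)' (fuel = enough iterations; each colon found is a new, larger index)
def pvCollectColons (low : List Char) : Nat → Int → List Nat
  | 0, _ => []
  | fuel+1, c =>
    if c = -1 then []
    else c.toNat :: pvCollectColons low fuel (PySem.Chars.findFrom low [':'] (c + 1) none)

-- inner 'for c in colons: if c >= n and low[c-n:c] == l: … break'
def pvFirstStartHit (low : List Char) (l : List Char) : List Nat → Option Nat
  | [] => none
  | c :: rest =>
    if (l.length : Int) ≤ (c : Int) ∧
        PySem.Chars.slice low (some ((c : Int) - l.length)) (some (c : Int)) = l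
    then some (c - l.length) else pvFirstStartHit low l rest

-- outer start-label loop keeping best = (match position, label length + 1)
def pvBestStartB (low : List Char) (colons : List Nat) : List String → Option (Nat × Nat) → Option (Nat × Nat)
  | [], best => best
  | lab :: rest, best =>
    let l := PySem.Chars.lower lab.toList
    let best' :=
      match pvFirstStartHit low l colons with
      | some m =>
        match best with
        | none => some (m, l.length + 1)
        | some b => if m < b.1 then some (m, l.length + 1) else some b
      | none => best
    pvBestStartB low colons rest best'

-- inner 'for c in colons: if c - n >= content_start and low[c-n:c] == lab: … break'
def pvFirstEndHit (low : List Char) (e : List Char) (cs : Nat) : List Nat → Option Nat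
  | [] => none
  | c :: rest =>
    if (cs : Int) ≤ (c : Int) - e.length ∧
        PySem.Chars.slice low (some ((c : Int) - e.length)) (some (c : Int)) = e
    then some (c - e.length) else pvFirstEndHit low e cs rest

-- outer end-label loop keeping stop (initially len(text))
def pvStopB (low : List Char) (colons : List Nat) (cs : Nat) : List String → Nat → Nat
  | [], stop => stop
  | lab :: rest, stop =>
    let stop' :=
      match pvFirstEndHit low lab.toList cs colons with
      | some j => if j < stop then j else stop
      | none => stop
    pvStopB low colons cs rest stop'

def extract_labeled_from_text_py_alt (block : String) (start_labels : List String) : Option String :=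
  if PySem.Chars.strip block.toList = [] then none
  else
    let text := PySem.Chars.strip (PySem.Chars.join [' '] (PySem.Chars.split₀ block.toList))
    let low := PySem.Chars.lower text
    let colons := pvCollectColons low (low.length + 1) (PySem.Chars.find low [':'])
    match pvBestStartB low colons start_labels none with
    | none => none
    | some bk =>
      let content_start := bk.1 + bk.2
      let stop := pvStopB low colons content_start pvEndLabels text.length
      let content := PySem.Chars.strip (PySem.Chars.slice text (some (content_start : Int)) (some (stop : Int)))
      if content = [] then none else some (String.ofList content)

-- ===== PRECONDITION & SPEC =====
def Spec_extract_labeled_from_text_py (block : String) (start_labels : List String) (out : Option String) : Prop := out = extract_labeled_from_text_py_alt block start_labels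
instance (block : String) (start_labels : List String) (out : Option String) : Decidable (Spec_extract_labeled_from_text_py block start_labels out) := by unfold Spec_extract_labeled_from_text_py; infer_instance

-- ===== CLAIM (what is proved, stated in full; the proofs are below) =====
def Claim_equal_extract_labeled_from_text_py : Prop := ∀ (block : String) (start_labels : List String), Dom_extract_labeled_from_text_py block start_labels → Spec_extract_labeled_from_text_py block start_labels (extract_labeled_from_text_py block start_labels)

-- ===== LEMMAS AND PROOFS =====

def pvRelE (len : Nat) (np : Int) (stop : Nat) : Prop :=
  (np = -1 ∧ stop = len) ∨ (np = (stop : Int) ∧ stop < len)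

def pvRelS (low : List Char) (st : Int × List Char) (b : Option (Nat × Nat)) : Prop :=
  (st.1 = -1 ∧ b = none) ∨
  (∃ m : Nat, st.1 = (m : Int) ∧ b = some (m, st.2.length) ∧ m + st.2.length ≤ low.length)

def pvColons (low : List Char) (cl : List Nat) (k : Nat) : Prop :=
  (∀ c, c ∈ cl ↔ ([':'] <+: low.drop c ∧ k ≤ c)) ∧ cl.Pairwise (· < ·)

lemma pv_infix_of_prefix_drop {p low : List Char} {j : Nat} (h : p <+: low.drop j) :
    p <:+: low := h.isInfix.trans ((low.drop_suffix j).isInfix)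

lemma pv_prefix_drop_lt {p : List Char} {low : List Char} {i : Nat}
    (hp : p ≠ []) (h : p <+: low.drop i) : i < low.length ∧ i + p.length ≤ low.length := by
  have hl := h.length_le
  simp [List.length_drop] at hl
  have hp' : 0 < p.length := List.length_pos_iff.mpr hp
  omega

lemma pvCollectColons_spec (low : List Char) :
    ∀ fuel (k : Nat), k ≤ low.length → low.length + 1 ≤ fuel + k →
      pvColons low (pvCollectColons low fuel (PySem.Chars.findFrom low [':'] (k : Int) none)) k := by
  intro fuel
  induction fuel with
  | zero => intro k hk hf; omega
  | succ n ih =>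
    intro k hk hf
    by_cases hneg : PySem.Chars.findFrom low [':'] (k : Int) none = -1
    · rw [pvCollectColons, if_pos hneg]
      have hno : ¬ ([':'] <:+: low.drop k) :=
        (PySem.Chars.findFrom_natCast_eq_neg_one_iff low [':'] k hk).mp hneg
      refine ⟨fun c => ?_, List.Pairwise.nil⟩
      simp only [List.not_mem_nil, false_iff]
      rintro ⟨hpre, hkc⟩
      exact hno (pv_infix_of_prefix_drop (j := c - k) (by
        rw [List.drop_drop]
        have : k + (c - k) = c := by omega
        rwa [this]))
    · obtain ⟨hkle, hpre, hmin⟩ := PySem.Chars.findFrom_natCast_spec low [':'] k hk hneg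
      set f := PySem.Chars.findFrom low [':'] (k : Int) none with hfdef
      have hf0 : 0 ≤ f := by omega
      set v := f.toNat with hvdef
      have hvk : k ≤ v := by omega
      have hvlen : v < low.length := (pv_prefix_drop_lt (by simp) hpre).1
      rw [pvCollectColons, if_neg hneg]
      have hcast : f + 1 = ((v + 1 : Nat) : Int) := by push_cast; omega
      rw [hcast]
      have htail := ih (v + 1) (by omega) (by omega)
      obtain ⟨hmem, hpair⟩ := htail
      constructor
      · intro c
        simp only [List.mem_cons, hmem]
        constructor
        · rintro (rfl | ⟨h1, h2⟩)
          · exact ⟨hpre, hvk⟩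
          · exact ⟨h1, by omega⟩
        · rintro ⟨h1, h2⟩
          by_cases hcv : c = v
          · exact Or.inl hcv
          · refine Or.inr ⟨h1, ?_⟩
            rcases Nat.lt_or_ge c v with hlt | hge
            · exact absurd h1 (hmin c h2 hlt)
            · omega
      · refine List.pairwise_cons.mpr ⟨fun c hc => ?_, hpair⟩
        have := (hmem c).mp hc
        omega

lemma pv_prefix_append_iff (xs ys t : List Char) :
    (xs ++ ys <+: t) ↔ xs <+: t ∧ ys <+: t.drop xs.length := by
  constructor
  · rintro ⟨u, rfl⟩
    refine ⟨⟨ys ++ u, by simp⟩, ?_⟩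
    rw [List.append_assoc, List.drop_left]
    exact ⟨u, rfl⟩
  · rintro ⟨⟨u, hu⟩, ⟨v, hv⟩⟩
    refine ⟨v, ?_⟩
    rw [List.append_assoc, hv]
    conv_rhs => rw [← List.take_append_drop xs.length t]
    congr 1
    have := congrArg (List.take xs.length) hu
    simpa using this

lemma pv_hit_iff (low l : List Char) (c : Nat) (hcol : [':'] <+: low.drop c) (hn : l.length ≤ c) :
    (PySem.Chars.slice low (some ((c : Int) - l.length)) (some (c : Int)) = l ↔
      (l ++ [':']) <+: low.drop (c - l.length)) := by
  have hcast : (c : Int) - l.length = ((c - l.length : Nat) : Int) := by omega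
  rw [hcast, PySem.Chars.slice_eq_listSlice, PySem.List.slice_natCast]
  have htk : c - (c - l.length) = l.length := by omega
  rw [htk]
  rw [pv_prefix_append_iff]
  constructor
  · intro h
    constructor
    · exact List.prefix_iff_eq_take.mpr h.symm
    · rw [List.drop_drop]
      have : c - l.length + l.length = c := by omega
      rwa [this]
  · rintro ⟨h1, _⟩
    exact (List.prefix_iff_eq_take.mp h1).symm

lemma pvColons_cons {low : List Char} {c : Nat} {rest : List Nat} {b : Nat}
    (h : pvColons low (c :: rest) b) :
    ([':'] <+: low.drop c) ∧ b ≤ c ∧ pvColons low rest (c + 1) := by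
  obtain ⟨hmem, hpair⟩ := h
  obtain ⟨hc1, hc2⟩ := (hmem c).mp List.mem_cons_self
  obtain ⟨hlt, hpair'⟩ := List.pairwise_cons.mp hpair
  refine ⟨hc1, hc2, fun d => ?_, hpair'⟩
  constructor
  · intro hd
    obtain ⟨h1, _⟩ := (hmem d).mp (List.mem_cons_of_mem _ hd)
    exact ⟨h1, hlt d hd⟩
  · rintro ⟨h1, h2⟩
    rcases List.mem_cons.mp ((hmem d).mpr ⟨h1, by omega⟩) with h | h
    · omega
    · exact h

lemma pv_match_colon {low e : List Char} {j : Nat} (h : (e ++ [':']) <+: low.drop j) :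
    [':'] <+: low.drop (j + e.length) := by
  obtain ⟨-, h2⟩ := (pv_prefix_append_iff _ _ _).mp h
  rw [List.drop_drop] at h2
  exact h2

lemma pv_infix_drop_iff (p low : List Char) (cs : Nat) :
    (p <:+: low.drop cs) ↔ ∃ j, cs ≤ j ∧ p <+: low.drop j := by
  rw [← PySem.Chars.isIn_iff_infix, ← PySem.Chars.exists_prefix_drop_iff_isIn]
  constructor
  · rintro ⟨j', hj'⟩
    exact ⟨cs + j', by omega, by rwa [List.drop_drop] at hj'⟩
  · rintro ⟨j, hj1, hj2⟩
    refine ⟨j - cs, ?_⟩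
    rw [List.drop_drop]
    have : cs + (j - cs) = j := by omega
    rwa [this]

lemma pvFirstEndHit_eq_aux (low e : List Char) (cs : Nat) (hcs : cs ≤ low.length) :
    ∀ (cl : List Nat) (b : Nat), pvColons low cl b →
      (∀ j, (e ++ [':']) <+: low.drop j → cs ≤ j → b ≤ j + e.length) →
      pvFirstEndHit low e cs cl =
        (if PySem.Chars.findFrom low (e ++ [':']) (cs : Int) none = -1 then none
         else some (PySem.Chars.findFrom low (e ++ [':']) (cs : Int) none).toNat) := by
  intro cl
  induction cl with
  | nil =>
    intro b hcl hb
    have hno : PySem.Chars.findFrom low (e ++ [':']) (cs : Int) none = -1 := by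
      rw [PySem.Chars.findFrom_natCast_eq_neg_one_iff low _ cs hcs]
      rw [pv_infix_drop_iff]
      rintro ⟨j, hj1, hj2⟩
      have hcol := pv_match_colon hj2
      have := (hcl.1 (j + e.length)).mpr ⟨hcol, hb j hj2 hj1⟩
      simp at this
    rw [if_pos hno]; rfl
  | cons c rest ih =>
    intro b hcl hb
    obtain ⟨hcol, hbc, hrest⟩ := pvColons_cons hcl
    by_cases hg : (cs : Int) ≤ (c : Int) - e.length ∧
        PySem.Chars.slice low (some ((c : Int) - e.length)) (some (c : Int)) = e
    · have hn : e.length ≤ c := by omega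
      have hcsj : cs ≤ c - e.length := by omega
      have hM : (e ++ [':']) <+: low.drop (c - e.length) := (pv_hit_iff low e c hcol hn).mp hg.2
      have hne : PySem.Chars.findFrom low (e ++ [':']) (cs : Int) none ≠ -1 := by
        intro h
        rw [PySem.Chars.findFrom_natCast_eq_neg_one_iff low _ cs hcs, pv_infix_drop_iff] at h
        exact h ⟨c - e.length, hcsj, hM⟩
      obtain ⟨hkle, hpre, hmin⟩ := PySem.Chars.findFrom_natCast_spec low (e ++ [':']) cs hcs hne
      set r := (PySem.Chars.findFrom low (e ++ [':']) (cs : Int) none).toNat with hr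
      have hcsr : cs ≤ r := by omega
      have hreq : r = c - e.length := by
        rcases Nat.lt_trichotomy r (c - e.length) with hlt | heq | hgt
        · exfalso
          have hcol2 := pv_match_colon hpre
          have hmem := (hcl.1 (r + e.length)).mpr ⟨hcol2, hb r hpre hcsr⟩
          rcases List.mem_cons.mp hmem with h | h
          · omega
          · have := (List.pairwise_cons.mp hcl.2).1 _ h
            omega
        · exact heq
        · exact absurd hM (hmin (c - e.length) hcsj hgt)
      rw [pvFirstEndHit, if_pos hg, if_neg hne, hreq]
    · rw [pvFirstEndHit, if_neg hg]
      refine ih (c + 1) hrest ?_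
      intro j hj hjcs
      have hcol2 := pv_match_colon hj
      have hmem := (hcl.1 (j + e.length)).mpr ⟨hcol2, hb j hj hjcs⟩
      rcases List.mem_cons.mp hmem with h | h
      · exfalso
        apply hg
        have hn : e.length ≤ c := by omega
        have hj' : j = c - e.length := by omega
        refine ⟨by omega, (pv_hit_iff low e c hcol hn).mpr (by rwa [← hj'])⟩
      · have := (List.pairwise_cons.mp hcl.2).1 _ h
        omega

lemma pvFirstStartHit_eq_end (low l : List Char) :
    ∀ cl : List Nat, pvFirstStartHit low l cl = pvFirstEndHit low l 0 cl := by
  intro cl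
  induction cl with
  | nil => rfl
  | cons c rest ih =>
    rw [pvFirstStartHit, pvFirstEndHit, ih]
    congr 1
    have : ((l.length : Int) ≤ (c : Int)) = (((0:Nat) : Int) ≤ (c : Int) - l.length) := by
      simp only [eq_iff_iff]; omega
    rw [this]

lemma pvFirstStartHit_eq (low l : List Char) {cl : List Nat} (hcl : pvColons low cl 0) :
    pvFirstStartHit low l cl =
      (if PySem.Chars.find low (l ++ [':']) = -1 then none
       else some (PySem.Chars.find low (l ++ [':'])).toNat) := by
  rw [pvFirstStartHit_eq_end,
    pvFirstEndHit_eq_aux low l 0 (by omega) cl 0 hcl (fun j _ _ => by omega)]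
  simp [PySem.Chars.findFrom_zero]

lemma pvFirstEndHit_eq (low e : List Char) (cs : Nat) {cl : List Nat}
    (hcl : pvColons low cl 0) (hcs : cs ≤ low.length) :
    pvFirstEndHit low e cs cl =
      (if PySem.Chars.findFrom low (e ++ [':']) (cs : Int) none = -1 then none
       else some (PySem.Chars.findFrom low (e ++ [':']) (cs : Int) none).toNat) :=
  pvFirstEndHit_eq_aux low e cs hcs cl 0 hcl (fun j _ _ => by omega)

lemma pvStart_rel (low : List Char) {cl : List Nat} (hcl : pvColons low cl 0) :
    ∀ (labs : List String) (st : Int × List Char) (b : Option (Nat × Nat)),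
      pvRelS low st b → pvRelS low (pvFindStartA low labs st) (pvBestStartB low cl labs b) := by
  intro labs
  induction labs with
  | nil => intro st b h; exact h
  | cons lab rest ih =>
    intro st b h
    rw [pvFindStartA, pvBestStartB]
    rw [pvFirstStartHit_eq low _ hcl]
    set lab_low := PySem.Chars.lower lab.toList ++ [':'] with hll
    set pos := PySem.Chars.find low lab_low with hpos
    have hlen : lab_low.length = (PySem.Chars.lower lab.toList).length + 1 := by
      simp [hll]
    by_cases hneg : pos = -1
    · rw [if_neg (by simp [hneg])]
      rw [if_pos hneg]
      exact ih st b h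
    · have h0 : 0 ≤ pos := by
        have := PySem.Chars.neg_one_le_find low lab_low
        omega
      have hm' : pos = ((pos.toNat : Nat) : Int) := by omega
      have hprefix := (PySem.Chars.find_spec (s := low) (sub := lab_low) h0).1
      have hbound := (pv_prefix_drop_lt (by simp [hll]) hprefix).2
      rw [if_neg hneg]
      rcases h with ⟨h1, rfl⟩ | ⟨m₀, h1, h2, h3⟩
      · rw [if_pos ⟨hneg, Or.inl h1⟩]
        refine ih _ _ (Or.inr ⟨pos.toNat, hm', ?_, by omega⟩)
        rw [hlen]
      · rw [h2]
        dsimp only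
        by_cases hlt : pos.toNat < m₀
        · rw [if_pos ⟨hneg, Or.inr (by omega)⟩, if_pos hlt]
          refine ih _ _ (Or.inr ⟨pos.toNat, hm', ?_, by omega⟩)
          rw [hlen]
        · rw [if_neg (by rw [h1]; omega), if_neg hlt]
          exact ih _ _ (Or.inr ⟨m₀, h1, rfl, h3⟩)

lemma pvStop_rel (low : List Char) {cl : List Nat} (hcl : pvColons low cl 0)
    (cs : Nat) (hcs : cs ≤ low.length) :
    ∀ (labs : List String) (np : Int) (stop : Nat),
      pvRelE low.length np stop →
      pvRelE low.length (pvFindNextA low (cs : Int) labs np) (pvStopB low cl cs labs stop) := by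
  intro labs
  induction labs with
  | nil => intro np stop h; exact h
  | cons lab rest ih =>
    intro np stop h
    rw [pvFindNextA, pvStopB]
    rw [pvFirstEndHit_eq low lab.toList cs hcl hcs]
    set p := PySem.Chars.findFrom low (lab.toList ++ [':']) (cs : Int) none with hp
    by_cases hneg : p = -1
    · rw [if_neg (by simp [hneg]), if_pos hneg]
      exact ih np stop h
    · obtain ⟨hkle, hpre, hmin⟩ :=
        PySem.Chars.findFrom_natCast_spec low (lab.toList ++ [':']) cs hcs hneg
      rw [← hp] at hkle hpre
      have h0 : 0 ≤ p := by omega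
      have hjlen : p.toNat < low.length := (pv_prefix_drop_lt (by simp) hpre).1
      have hcast : p = ((p.toNat : Nat) : Int) := by omega
      rw [if_neg hneg]
      dsimp only
      rcases h with ⟨h1, rfl⟩ | ⟨h1, h2⟩
      · rw [if_pos ⟨hneg, Or.inl h1⟩, if_pos hjlen]
        exact ih _ _ (Or.inr ⟨hcast, hjlen⟩)
      · by_cases hlt : p.toNat < stop
        · rw [if_pos ⟨hneg, Or.inr (by omega)⟩, if_pos hlt]
          exact ih _ _ (Or.inr ⟨hcast, hjlen⟩)
        · rw [if_neg (by rw [h1]; omega), if_neg hlt]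
          exact ih _ _ (Or.inr ⟨h1, h2⟩)

-- ===== VERDICT (by name: the statement is the Claim_ definition above) =====
theorem extract_labeled_from_text_py_spec : Claim_equal_extract_labeled_from_text_py := by
  intro block start_labels _
  unfold Spec_extract_labeled_from_text_py
  unfold extract_labeled_from_text_py extract_labeled_from_text_py_alt
  by_cases hstrip : PySem.Chars.strip block.toList = []
  · rw [if_pos hstrip, if_pos hstrip]
  · rw [if_neg hstrip, if_neg hstrip]
    dsimp only
    set text := PySem.Chars.strip (PySem.Chars.join [' '] (PySem.Chars.split₀ block.toList)) with htext
    set low := PySem.Chars.lower text with hlow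
    have hlen : low.length = text.length := by
      simp [hlow, PySem.Chars.lower]
    set colons := pvCollectColons low (low.length + 1) (PySem.Chars.find low [':']) with hcolons
    have hcl : pvColons low colons 0 := by
      rw [hcolons, ← PySem.Chars.findFrom_zero]
      have := pvCollectColons_spec low (low.length + 1) 0 (by omega) (by omega)
      simpa using this
    have hrel := pvStart_rel low hcl start_labels (-1, []) none (Or.inl ⟨rfl, rfl⟩)
    set st := pvFindStartA low start_labels (-1, []) with hst
    set bb := pvBestStartB low colons start_labels none with hbb
    rcases hrel with ⟨h1, h2⟩ | ⟨m, h1, h2, h3⟩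
    · rw [if_pos h1, h2]
    · rw [if_neg (by rw [h1]; omega), h2]
      dsimp only
      have hcs_eq : st.1 + (st.2.length : Int) = ((m + st.2.length : Nat) : Int) := by
        rw [h1]; push_cast; ring
      rw [hcs_eq]
      have hrelE := pvStop_rel low hcl (m + st.2.length) h3 pvEndLabels (-1) text.length
        (Or.inl ⟨rfl, hlen.symm⟩)
      set np := pvFindNextA low ((m + st.2.length : Nat) : Int) pvEndLabels (-1) with hnp
      set stop := pvStopB low colons (m + st.2.length) pvEndLabels text.length with hstop
      rcases hrelE with ⟨e1, e2⟩ | ⟨e1, e2⟩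
      · have hb : (if np ≠ -1 then np else (text.length : Int)) = (stop : Int) := by
          rw [if_neg (by rw [e1]; omega)]
          rw [e2, hlen]
        rw [hb]
      · have hb : (if np ≠ -1 then np else (text.length : Int)) = (stop : Int) := by
          rw [if_pos (by rw [e1]; omega)]
          exact e1
        rw [hb]
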